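-- pv_equiv track=rewrite | github.com/renatovarges/ranking-jogadores | app.py | sort_scouts
-- ===== SOURCE A (Python) =====
-- def sort_scouts(scouts_dict):
--     """
--     Sort scouts:
--     1. Positive scouts (Desc quantity)
--     2. Negative scouts (Desc quantity)
--     """
--     neg_keys = ['GS', 'PP', 'FC', 'I', 'PI', 'CA', 'CV', 'PC', 'GC']
--
--     pos_list = []
--     neg_list = []
--
--     for k, v in scouts_dict.items():
--         if v == 0: continue
--         if k in neg_keys:
--             neg_list.append((k, v))
--         else:
--             pos_list.append((k, v))
--
--     pos_list.sort(key=lambda x: x[1], reverse=True)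
--     neg_list.sort(key=lambda x: x[1], reverse=True)
--
--     return pos_list, neg_list
-- ===== SOURCE B (Python) =====
-- def sort_scouts(scouts_dict):
--     """
--     Sort scouts:
--     1. Positive scouts (Desc quantity)
--     2. Negative scouts (Desc quantity)
--     """
--     neg_keys = frozenset({'GS', 'PP', 'FC', 'I', 'PI', 'CA', 'CV', 'PC', 'GC'})
--
--     def insert_desc(lst, kv):
--         # insertion into a descending list, after equal values (keeps stability)
--         i = 0
--         while i < len(lst) and lst[i][1] >= kv[1]:
--             i += 1
--         lst.insert(i, kv)
--
--     pos_list = []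
--     neg_list = []
--     for k, v in scouts_dict.items():
--         if v != 0:
--             insert_desc(neg_list if k in neg_keys else pos_list, (k, v))
--     return pos_list, neg_list
-- ===== Notes on version B (the rewrite author's own statement) =====
-- stated objective: alternative
-- what changed: B maintains the two result lists already sorted while it scans the dict once, placing each nonzero pair directly at its descending-order position by stable insertion (insertion sort on the fly), instead of A's collect-then-sort-each-list; equal quantities are inserted after earlier ones, reproducing the stable sort order.
import Mathlib
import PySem

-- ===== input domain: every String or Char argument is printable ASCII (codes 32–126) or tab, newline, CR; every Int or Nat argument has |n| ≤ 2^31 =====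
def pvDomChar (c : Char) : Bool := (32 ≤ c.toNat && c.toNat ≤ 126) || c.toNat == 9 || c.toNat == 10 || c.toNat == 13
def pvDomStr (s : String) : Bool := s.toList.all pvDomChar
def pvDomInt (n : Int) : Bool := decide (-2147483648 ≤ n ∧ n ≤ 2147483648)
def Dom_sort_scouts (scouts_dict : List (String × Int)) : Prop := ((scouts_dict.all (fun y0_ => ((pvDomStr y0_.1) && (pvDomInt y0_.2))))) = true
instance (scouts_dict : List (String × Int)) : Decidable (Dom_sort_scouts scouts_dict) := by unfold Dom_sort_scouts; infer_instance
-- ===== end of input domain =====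

-- B scans the dict once, placing each nonzero pair directly at its sorted (descending,
-- stable) position in the proper list by insertion, instead of A's collect-then-sort-each.


-- ===== PORT A =====
def negKeysA : List String := ["GS", "PP", "FC", "I", "PI", "CA", "CV", "PC", "GC"]

def sort_scouts (scouts_dict : List (String × Int)) : (List (String × Int)) × (List (String × Int)) :=
  -- the for-loop: two accumulators pos_list / neg_list, skip v == 0
  let lists := scouts_dict.foldl
    (fun (acc : List (String × Int) × List (String × Int)) kv =>
      if kv.2 == 0 then acc
      else if negKeysA.contains kv.1 then (acc.1, acc.2 ++ [kv])
      else (acc.1 ++ [kv], acc.2))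
    ([], [])
  -- the two in-place sorts, key = x[1], reverse = True
  (PySem.List.sorted lists.1 (fun x => x.2) true,
   PySem.List.sorted lists.2 (fun x => x.2) true)

-- ===== PORT B =====
def negKeysB : PySem.Set String :=
  PySem.Set.ofList ["GS", "PP", "FC", "I", "PI", "CA", "CV", "PC", "GC"]

-- insert_desc: walk past every entry with quantity ≥ kv's, insert there (the while loop)
def insertDesc : List (String × Int) → (String × Int) → List (String × Int)
  | [], kv => [kv]
  | y :: ys, kv => if kv.2 ≤ y.2 then y :: insertDesc ys kv else kv :: y :: ys

-- the for-loop of B, carrying both sorted accumulators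
def sortScoutsGo : List (String × Int) → List (String × Int) → List (String × Int) →
    (List (String × Int)) × (List (String × Int))
  | [], pos_list, neg_list => (pos_list, neg_list)
  | kv :: rest, pos_list, neg_list =>
    if kv.2 != 0 then
      if PySem.Set.contains negKeysB kv.1 then
        sortScoutsGo rest pos_list (insertDesc neg_list kv)
      else
        sortScoutsGo rest (insertDesc pos_list kv) neg_list
    else sortScoutsGo rest pos_list neg_list

def sort_scouts_alt (scouts_dict : List (String × Int)) : (List (String × Int)) × (List (String × Int)) :=
  sortScoutsGo scouts_dict [] []

-- ===== PRECONDITION & SPEC =====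
def Spec_sort_scouts (scouts_dict : List (String × Int)) (out : (List (String × Int)) × (List (String × Int))) : Prop := out = sort_scouts_alt scouts_dict
instance (scouts_dict : List (String × Int)) (out : (List (String × Int)) × (List (String × Int))) : Decidable (Spec_sort_scouts scouts_dict out) := by unfold Spec_sort_scouts; infer_instance

-- ===== CLAIM (what is proved, stated in full; the proofs are below) =====
def Claim_equal_sort_scouts : Prop := ∀ (scouts_dict : List (String × Int)), Dom_sort_scouts scouts_dict → Spec_sort_scouts scouts_dict (sort_scouts scouts_dict)

-- ===== LEMMAS AND PROOFS =====

-- B's insertion is exactly the stable descending insertion of PySem's insertion sort.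
lemma insertDesc_eq_insertBy (ys : List (String × Int)) (kv : String × Int) :
    insertDesc ys kv =
      PySem.List.insertBy (fun a b : String × Int => decide (b.2 < a.2)) kv ys := by
  induction ys with
  | nil => rfl
  | cons y ys ih =>
    show (if kv.2 ≤ y.2 then y :: insertDesc ys kv else kv :: y :: ys) = _
    rw [PySem.List.insertBy]
    by_cases h : kv.2 ≤ y.2
    · rw [if_pos h, if_neg (by simpa using not_lt.mpr h), ih]
    · rw [if_neg h, if_pos (by simpa using lt_of_not_ge h)]

-- B's loop = fold the descending insertion over the two filtered sublists.
lemma sortScoutsGo_eq (d : List (String × Int)) (p n : List (String × Int)) :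
    sortScoutsGo d p n =
      ((d.filter (fun kv => kv.2 != 0 && !PySem.Set.contains negKeysB kv.1)).foldl insertDesc p,
       (d.filter (fun kv => kv.2 != 0 && PySem.Set.contains negKeysB kv.1)).foldl insertDesc n) := by
  induction d generalizing p n with
  | nil => rfl
  | cons kv d ih =>
    rw [List.filter_cons, List.filter_cons, sortScoutsGo]
    by_cases h0 : kv.2 = 0
    · have e : (kv.2 != 0) = false := by simpa using h0
      simp only [e, Bool.false_eq_true, if_false, Bool.false_and]
      exact ih p n
    · have e : (kv.2 != 0) = true := by simpa using h0
      by_cases hn : PySem.Set.contains negKeysB kv.1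
      · simp only [e, hn, if_true, Bool.true_and, Bool.not_true, Bool.false_eq_true, if_false,
          List.foldl_cons]
        exact ih p (insertDesc n kv)
      · have hn' : PySem.Set.contains negKeysB kv.1 = false := by simpa using hn
        simp only [e, hn', if_true, Bool.true_and, Bool.not_false, Bool.false_eq_true, if_false,
          List.foldl_cons]
        exact ih (insertDesc p kv) n

-- A's loop produces the two filtered sublists (in dict order).
lemma sort_scouts_loop (d : List (String × Int)) (a b : List (String × Int)) :
    d.foldl
      (fun (acc : List (String × Int) × List (String × Int)) kv =>
        if kv.2 == 0 then acc
        else if negKeysA.contains kv.1 then (acc.1, acc.2 ++ [kv])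
        else (acc.1 ++ [kv], acc.2))
      (a, b) =
    (a ++ d.filter (fun kv => kv.2 != 0 && !negKeysA.contains kv.1),
     b ++ d.filter (fun kv => kv.2 != 0 && negKeysA.contains kv.1)) := by
  induction d generalizing a b with
  | nil => simp
  | cons kv d ih =>
    rw [List.foldl_cons, List.filter_cons, List.filter_cons]
    by_cases h0 : kv.2 = 0
    · have e1 : (kv.2 == 0) = true := by simpa using h0
      have e2 : (kv.2 != 0) = false := by simpa using h0
      simp only [e1, e2, if_true, Bool.false_and, Bool.false_eq_true, if_false]
      exact ih a b
    · have e1 : (kv.2 == 0) = false := by simpa using h0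
      have e2 : (kv.2 != 0) = true := by simpa using h0
      by_cases hn : negKeysA.contains kv.1
      · simp only [e1, e2, hn, Bool.false_eq_true, if_false, if_true, Bool.true_and,
          Bool.not_true]
        rw [ih]
        simp
      · have hn' : negKeysA.contains kv.1 = false := by simpa using hn
        simp only [e1, e2, hn', Bool.false_eq_true, if_false, Bool.true_and,
          Bool.not_false, if_true]
        rw [ih]
        simp

-- the two membership tests agree
lemma negKeys_contains_eq (k : String) :
    PySem.Set.contains negKeysB k = negKeysA.contains k := by
  have h : (negKeysB : List String) = negKeysA := by decide
  rw [PySem.Set.contains, h]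

-- stable descending sort = fold of the descending insertion
lemma sorted_rev_eq_foldl_insertDesc (xs : List (String × Int)) :
    PySem.List.sorted xs (fun x => x.2) true = xs.foldl insertDesc [] := by
  rw [PySem.List.sorted_rev_eq_foldl_insertBy]
  induction xs using List.reverseRecOn with
  | nil => rfl
  | append_singleton xs x ih =>
    rw [List.foldl_append, List.foldl_append, ih, List.foldl_cons, List.foldl_cons,
      List.foldl_nil, List.foldl_nil, insertDesc_eq_insertBy]

-- ===== VERDICT (by name: the statement is the Claim_ definition above) =====
theorem sort_scouts_spec : Claim_equal_sort_scouts := by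
  intro d _
  unfold Spec_sort_scouts sort_scouts sort_scouts_alt
  rw [sort_scouts_loop, sortScoutsGo_eq]
  simp only [List.nil_append]
  have hp : List.filter (fun kv : String × Int =>
      kv.2 != 0 && !PySem.Set.contains negKeysB kv.1) d =
      List.filter (fun kv => kv.2 != 0 && !negKeysA.contains kv.1) d := by
    apply List.filter_congr; intro kv _; rw [negKeys_contains_eq kv.1]
  have hn : List.filter (fun kv : String × Int =>
      kv.2 != 0 && PySem.Set.contains negKeysB kv.1) d =
      List.filter (fun kv => kv.2 != 0 && negKeysA.contains kv.1) d := by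
    apply List.filter_congr; intro kv _; rw [negKeys_contains_eq kv.1]
  rw [hp, hn, sorted_rev_eq_foldl_insertDesc, sorted_rev_eq_foldl_insertDesc]
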